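-- pv_equiv track=rewrite | github.com/ramrayavarapu/lipi-lang | src/lipi.py | find_operator_outside_strings
-- ===== SOURCE A (Python) =====
-- def find_operator_outside_strings(expr, operator):
--     """
--     Find the position of an operator that's outside of string literals.
--     Returns the position, or -1 if not found outside strings.
--     """
--     in_string = False
--     string_char = None
--     i = 0
--
--     while i < len(expr):
--         char = expr[i]
--
--         # Track string boundaries
--         if char in ['"', "'"] and (i == 0 or expr[i-1] != '\\'):
--             if not in_string:
--                 in_string = True
--                 string_char = char
--             elif char == string_char:
--                 in_string = False
--                 string_char = None
--
--         # Check for operator outside strings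
--         if not in_string:
--             if expr[i:i+len(operator)] == operator:
--                 return i
--
--         i += 1
--
--     return -1
-- ===== SOURCE B (Python) =====
-- def find_operator_outside_strings(expr, operator):
--     """
--     Find the position of an operator that's outside of string literals.
--     Returns the position, or -1 if not found outside strings.
--     """
--     # Pass 1: mask[i] = in-string state right AFTER the quote toggle at i
--     # (an opening quote is inside at its own index, a closing quote is outside).
--     mask = []
--     in_string = False
--     string_char = None
--     for i, ch in enumerate(expr):
--         if ch in ('"', "'") and (i == 0 or expr[i - 1] != '\\'):
--             if not in_string:
--                 in_string, string_char = True, ch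
--             elif ch == string_char:
--                 in_string, string_char = False, None
--         mask.append(in_string)
--     # Pass 2: first unmasked position where the operator matches.
--     k = len(operator)
--     for i in range(len(expr)):
--         if not mask[i] and expr[i:i + k] == operator:
--             return i
--     return -1
-- ===== Notes on version B (the rewrite author's own statement) =====
-- stated objective: alternative
-- what changed: A fuses state tracking and operator matching into one while loop; B makes two passes: it first materialises an in-string mask for every index, then scans the mask for the first unmasked position where the operator slice matches.
import Mathlib
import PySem

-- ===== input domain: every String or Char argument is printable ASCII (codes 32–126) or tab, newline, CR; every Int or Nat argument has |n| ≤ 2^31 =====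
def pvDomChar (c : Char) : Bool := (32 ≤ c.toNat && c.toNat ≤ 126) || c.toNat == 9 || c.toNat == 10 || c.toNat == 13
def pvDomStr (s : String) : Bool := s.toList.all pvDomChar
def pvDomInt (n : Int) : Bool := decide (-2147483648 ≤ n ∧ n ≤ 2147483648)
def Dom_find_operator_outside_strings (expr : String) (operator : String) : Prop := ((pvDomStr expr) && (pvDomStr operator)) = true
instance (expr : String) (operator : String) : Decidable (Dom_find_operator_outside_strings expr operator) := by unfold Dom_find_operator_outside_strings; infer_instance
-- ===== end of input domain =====

-- B makes two passes (mask of in-string positions, then scan) where A fuses both into one loop; alternative decomposition, equal cost.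

-- ===== PORT A =====
-- quote-toggle step at index i with state (in_string, string_char); shared logic of both Pythons
def quoteStep (e : List Char) (i : Nat) (ins : Bool) (sc : Option Char) : Bool × Option Char :=
  let c := e.getD i ' '   -- expr[i], always in range when called with i < e.length
  if (c = '"' ∨ c = '\'') ∧ (i = 0 ∨ e.getD (i-1) ' ' ≠ '\\') then
    if ins = false then (true, some c)
    else if sc = some c then (false, none)
    else (ins, sc)
  else (ins, sc)

-- A's while loop: carry i, in_string, string_char; check operator right after the toggle
def loopA (e op : List Char) (i : Nat) (ins : Bool) (sc : Option Char) : Int :=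
  if i < e.length then
    let st := quoteStep e i ins sc
    -- expr[i:i+len(operator)] == operator  (nonnegative slice = take/drop)
    if st.1 = false ∧ (e.drop i).take op.length = op then (i : Int)
    else loopA e op (i+1) st.1 st.2
  else -1
termination_by e.length - i

def find_operator_outside_strings (expr : String) (operator : String) : Int :=
  loopA expr.toList operator.toList 0 false none

-- ===== PORT B =====
-- Pass 1 (Source B's first for loop): append the post-toggle in_string flag for each index
def buildMask (e : List Char) (i : Nat) (mask : List Bool) (ins : Bool) (sc : Option Char) : List Bool :=
  if i < e.length then
    let st := quoteStep e i ins sc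
    buildMask e (i+1) (mask ++ [st.1]) st.1 st.2
  else mask
termination_by e.length - i

-- Pass 2 (Source B's range loop): first unmasked index where the operator slice matches
def scanB (e op : List Char) (mask : List Bool) (i : Nat) : Int :=
  if i < e.length then
    if mask.getD i true = false ∧ (e.drop i).take op.length = op then (i : Int)
    else scanB e op mask (i+1)
  else -1
termination_by e.length - i

def find_operator_outside_strings_alt (expr : String) (operator : String) : Int :=
  scanB expr.toList operator.toList (buildMask expr.toList 0 [] false none) 0

-- ===== PRECONDITION & SPEC =====
def Spec_find_operator_outside_strings (expr : String) (operator : String) (out : Int) : Prop := out = find_operator_outside_strings_alt expr operator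
instance (expr : String) (operator : String) (out : Int) : Decidable (Spec_find_operator_outside_strings expr operator out) := by unfold Spec_find_operator_outside_strings; infer_instance

-- ===== CLAIM (what is proved, stated in full; the proofs are below) =====
def Claim_equal_find_operator_outside_strings : Prop := ∀ (expr : String) (operator : String), Dom_find_operator_outside_strings expr operator → Spec_find_operator_outside_strings expr operator (find_operator_outside_strings expr operator)

-- ===== LEMMAS AND PROOFS =====

-- buildMask only appends: its accumulator is a prefix of the result
theorem buildMask_prefix (e : List Char) (i : Nat) (mask : List Bool) (ins : Bool) (sc : Option Char) :
    mask <+: buildMask e i mask ins sc := by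
  induction hn : e.length - i generalizing i mask ins sc with
  | zero =>
    unfold buildMask
    rw [if_neg (by omega)]
  | succ n ih =>
    unfold buildMask
    rw [if_pos (by omega)]
    exact List.IsPrefix.trans (List.prefix_append _ _) (ih _ _ _ _ (by omega))

-- getD at an index inside a prefix reads the prefix
theorem getD_of_prefix (p m : List Bool) (i : Nat) (d : Bool) (hp : p <+: m) (hi : i < p.length) :
    m.getD i d = p.getD i d := by
  obtain ⟨t, rfl⟩ := hp
  simp [List.getD, List.getElem?_append_left hi]

-- core invariant: scanning the mask built from state (ins, sc) at index i equals A's fused loop from the same state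
theorem scan_eq_loop (e op : List Char) (i : Nat) (mask : List Bool) (ins : Bool) (sc : Option Char)
    (hlen : mask.length = i) :
    scanB e op (buildMask e i mask ins sc) i = loopA e op i ins sc := by
  induction hn : e.length - i generalizing i mask ins sc with
  | zero =>
    unfold scanB loopA
    rw [if_neg (by omega), if_neg (by omega)]
  | succ n ih =>
    have hi : i < e.length := by omega
    conv_lhs => rw [buildMask, if_pos hi]
    rw [scanB, if_pos hi]
    have hget : (buildMask e (i+1) (mask ++ [(quoteStep e i ins sc).1]) (quoteStep e i ins sc).1 (quoteStep e i ins sc).2).getD i true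
        = (quoteStep e i ins sc).1 := by
      rw [getD_of_prefix (mask ++ [(quoteStep e i ins sc).1]) _ i true
            (buildMask_prefix _ _ _ _ _) (by simp [hlen])]
      simp [List.getD, hlen]
    rw [hget]
    rw [loopA, if_pos hi]
    by_cases hc : (quoteStep e i ins sc).1 = false ∧ (e.drop i).take op.length = op
    · rw [if_pos hc, if_pos hc]
    · rw [if_neg hc, if_neg hc]
      exact ih _ _ _ _ (by simp [hlen]) (by omega)

-- ===== VERDICT (by name: the statement is the Claim_ definition above) =====
theorem find_operator_outside_strings_spec : Claim_equal_find_operator_outside_strings := by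
  intro expr operator _
  unfold Spec_find_operator_outside_strings find_operator_outside_strings find_operator_outside_strings_alt
  exact (scan_eq_loop expr.toList operator.toList 0 [] false none rfl).symm
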